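-- pv_equiv track=rewrite | github.com/Battal99/algorithms | course_shultais/recursion/clear_brackets.py | clear_brackets
-- ===== SOURCE A (Python) =====
-- def clear_brackets(string: str):
--     open_bracket: int = -1
--     closed_bracket: int = -1
--     for i in range(len(string)):
--         if string[i] == '(':
--             open_bracket = i
--         elif string[i] == ')':
--             closed_bracket = i
--     if open_bracket and closed_bracket and closed_bracket < open_bracket:
--         return clear_brackets(string[:open_bracket])
--     elif closed_bracket < 0 and open_bracket >= 0:
--         return clear_brackets(string[:open_bracket])
--     return string
-- ===== SOURCE B (Python) =====
-- def clear_brackets(string: str):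
--     # One backward pass: stop at the last ')'; the earliest '(' seen before
--     # stopping is where the string gets cut (everything from there on is
--     # trailing bracket content).  No match -> string unchanged.
--     cut = None
--     for i in reversed(range(len(string))):
--         ch = string[i]
--         if ch == ')':
--             break
--         if ch == '(':
--             cut = i
--     return string if cut is None else string[:cut]
-- ===== Notes on version B (the rewrite author's own statement) =====
-- stated objective: alternative
-- what changed: A repeatedly rescans the whole string for the last '(' and last ')' and recurses, trimming one '(' per pass; B makes a single backward pass that stops at the last ')' and remembers the earliest '(' seen, cutting there once.
-- intended difference: On strings whose last closing bracket sits at index 0 with some opening bracket after it, A's int-truthiness test treats index 0 as false so A returns the string unchanged, while B trims at the first opening bracket after that closing one, which is the intended trimming rule applied uniformly. — e.g. on clear_brackets(")("): A returns ")(", B returns ")"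
import Mathlib
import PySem

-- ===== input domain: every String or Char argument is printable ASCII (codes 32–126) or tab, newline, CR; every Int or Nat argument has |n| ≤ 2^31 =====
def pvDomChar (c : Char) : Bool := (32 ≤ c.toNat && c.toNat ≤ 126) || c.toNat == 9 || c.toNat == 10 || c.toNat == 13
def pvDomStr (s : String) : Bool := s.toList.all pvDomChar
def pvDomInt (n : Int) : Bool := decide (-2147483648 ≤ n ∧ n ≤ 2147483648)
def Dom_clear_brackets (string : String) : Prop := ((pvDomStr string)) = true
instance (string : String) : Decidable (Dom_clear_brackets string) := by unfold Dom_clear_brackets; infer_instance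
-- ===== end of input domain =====

-- B replaces A's recursive rescan-and-trim with a single backward pass (alternative
-- algorithm); equivalence of the return values is proved outside D_, where A's
-- int-truthiness quirk skips the trim and B trims.

-- ===== PORT A =====
-- A's for-loop: last index of '(' and of ')' (or -1), scanned left to right
def pvScan (l : List Char) : Int × Int :=
  (PySem.List.pyRange 0 l.length).foldl
    (fun oc i =>
      if PySem.List.pyGetD l i ' ' = '(' then (i, oc.2)
      else if PySem.List.pyGetD l i ' ' = ')' then (oc.1, i)
      else oc)
    (-1, -1)

def clear_brackets_core : Nat → List Char → List Char
  | 0, l => l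
  | n + 1, l =>
    let oc := pvScan l
    if oc.1 ≠ 0 ∧ oc.2 ≠ 0 ∧ oc.2 < oc.1 then
      clear_brackets_core n (PySem.List.slice l none (some oc.1))
    else if oc.2 < 0 ∧ 0 ≤ oc.1 then
      clear_brackets_core n (PySem.List.slice l none (some oc.1))
    else l

def clear_brackets (string : String) : String :=
  String.ofList (clear_brackets_core (string.toList.length + 1) string.toList)


-- ===== PORT B =====
-- B's backward for-loop over reversed(range(len(string))): break at ')', record '(' in cut
def altScanRev : List Char → Int → Option Int → Option Int
  | [], _, cut => cut
  | ch :: rest, i, cut =>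
    if ch = ')' then cut
    else altScanRev rest (i - 1) (if ch = '(' then some i else cut)

def clear_brackets_alt (string : String) : String :=
  match altScanRev string.toList.reverse ((string.toList.length : Int) - 1) none with
  | none => string
  | some q => String.ofList (PySem.List.slice string.toList none (some q))


-- ===== PRECONDITION & SPEC =====
-- On strings whose last closing bracket sits at index 0 with some opening bracket
-- after it, A's int-truthiness test on the two indices treats index 0 as false, so A
-- returns the string unchanged, while B trims at the first opening bracket after that
-- closing one — the intended trimming rule applied uniformly.
def D_clear_brackets (string : String) : Prop :=
  string.toList.head? = some ')' ∧ ')' ∉ string.toList.tail ∧ '(' ∈ string.toList.tail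
instance (string : String) : Decidable (D_clear_brackets string) := by
  unfold D_clear_brackets; infer_instance

def Spec_clear_brackets (string : String) (out : String) : Prop :=
  ¬ D_clear_brackets string → out = clear_brackets_alt string
instance (string : String) (out : String) : Decidable (Spec_clear_brackets string out) := by
  unfold Spec_clear_brackets; infer_instance

def pvDiffWitness_clear_brackets : String := ")("
def pvDiffWitnessOut_clear_brackets : String × String := (")(", ")")

-- ===== CLAIM (what is proved, stated in full; the proofs are below) =====
def Claim_unchanged_clear_brackets : Prop :=
  ∀ (string : String), Dom_clear_brackets string → Spec_clear_brackets string (clear_brackets string)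
def Claim_changed_clear_brackets : Prop :=
  Dom_clear_brackets (pvDiffWitness_clear_brackets) ∧ D_clear_brackets (pvDiffWitness_clear_brackets) ∧ clear_brackets (pvDiffWitness_clear_brackets) = pvDiffWitnessOut_clear_brackets.1 ∧ clear_brackets_alt (pvDiffWitness_clear_brackets) = pvDiffWitnessOut_clear_brackets.2 ∧ pvDiffWitnessOut_clear_brackets.1 ≠ pvDiffWitnessOut_clear_brackets.2
def Claim_exact_clear_brackets : Prop :=
  ∀ (string : String), Dom_clear_brackets string → D_clear_brackets string → clear_brackets string ≠ clear_brackets_alt string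

-- ===== LEMMAS AND PROOFS =====
def specLast (ch : Char) : List Char → Int
  | [] => -1
  | a :: t => if 0 ≤ specLast ch t then specLast ch t + 1 else if a = ch then 0 else -1

def specFirst (ch : Char) : List Char → Int
  | [] => -1
  | a :: t => if a = ch then 0 else if 0 ≤ specFirst ch t then specFirst ch t + 1 else -1

def specFirstFrom (ch : Char) (l : List Char) (k : Nat) : Int :=
  if 0 ≤ specFirst ch (l.drop k) then specFirst ch (l.drop k) + k else -1

lemma specLast_lb (ch : Char) (l : List Char) : -1 ≤ specLast ch l := by
  induction l with
  | nil => simp [specLast]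
  | cons a t ih => simp only [specLast]; split_ifs <;> omega

lemma specLast_lt (ch : Char) (l : List Char) : specLast ch l < l.length := by
  induction l with
  | nil => simp [specLast]
  | cons a t ih => simp only [specLast, List.length_cons]; split_ifs <;> push_cast <;> omega

lemma specLast_neg (ch : Char) (l : List Char) : specLast ch l = -1 ↔ ch ∉ l := by
  induction l with
  | nil => simp [specLast]
  | cons a t ih =>
    have hlb := specLast_lb ch t
    simp only [specLast, List.mem_cons]
    split_ifs with h1 h2
    · have hmem : ch ∈ t := by by_contra hm; have := ih.mpr hm; omega
      simp [hmem]; omega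
    · simp [h2]
    · have hr : specLast ch t = -1 := by omega
      simp [Ne.symm h2, ih.mp hr]

lemma specLast_get (ch : Char) (l : List Char) (h : 0 ≤ specLast ch l) :
    l[(specLast ch l).toNat]? = some ch := by
  induction l with
  | nil => simp [specLast] at h
  | cons a t ih =>
    have hlb := specLast_lb ch t
    simp only [specLast] at h ⊢
    split_ifs at h ⊢ with h1 h2
    · have hnat : ((specLast ch t + 1).toNat) = (specLast ch t).toNat + 1 := by omega
      rw [hnat]; simpa using ih h1
    · simp [h2]
    · omega

lemma specLast_ge (ch : Char) (l : List Char) (i : Nat) (h : l[i]? = some ch) :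
    (i : Int) ≤ specLast ch l := by
  induction l generalizing i with
  | nil => simp at h
  | cons a t ih =>
    have hlb := specLast_lb ch t
    simp only [specLast]
    cases i with
    | zero => simp at h; split_ifs <;> omega
    | succ j =>
      simp only [List.getElem?_cons_succ] at h
      have := ih j h
      split_ifs <;> push_cast <;> omega

lemma specLast_append (ch : Char) (xs : List Char) (a : Char) :
    specLast ch (xs ++ [a]) = if a = ch then (xs.length : Int) else specLast ch xs := by
  induction xs with
  | nil => simp [specLast]
  | cons x xs ih =>
    have hlb := specLast_lb ch xs
    simp only [List.cons_append, specLast, ih, List.length_cons]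
    split_ifs <;> push_cast <;> omega

lemma specLast_take (ch : Char) (l : List Char) (n : Nat) (h : specLast ch l < n) :
    specLast ch (l.take n) = specLast ch l := by
  induction l generalizing n with
  | nil => simp
  | cons a t ih =>
    have hlb := specLast_lb ch t
    cases n with
    | zero =>
      have h0 : specLast ch (a :: t) = -1 := by
        have := specLast_lb ch (a :: t); omega
      simp only [List.take_zero]; rw [h0]; rfl
    | succ m =>
      simp only [List.take_succ_cons, specLast] at h ⊢
      by_cases h1 : 0 ≤ specLast ch t
      · rw [if_pos h1] at h
        have hm : specLast ch t < (m : Int) := by push_cast at h ⊢; omega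
        rw [ih m hm]
      · have hr : specLast ch t = -1 := by omega
        have hnot : ch ∉ List.take m t := fun hmm => (specLast_neg ch t).mp hr (List.mem_of_mem_take hmm)
        rw [(specLast_neg ch (List.take m t)).mpr hnot, if_neg h1]
        norm_num

lemma specFirst_lb (ch : Char) (l : List Char) : -1 ≤ specFirst ch l := by
  induction l with
  | nil => simp [specFirst]
  | cons a t ih => simp only [specFirst]; split_ifs <;> omega

lemma specFirst_lt (ch : Char) (l : List Char) : specFirst ch l < l.length := by
  induction l with
  | nil => simp [specFirst]
  | cons a t ih => simp only [specFirst, List.length_cons]; split_ifs <;> push_cast <;> omega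

lemma specFirst_neg (ch : Char) (l : List Char) : specFirst ch l = -1 ↔ ch ∉ l := by
  induction l with
  | nil => simp [specFirst]
  | cons a t ih =>
    have hlb := specFirst_lb ch t
    simp only [specFirst, List.mem_cons]
    split_ifs with h1 h2
    · simp [h1]
    · have hmem : ch ∈ t := by by_contra hm; have := ih.mpr hm; omega
      simp [hmem]; omega
    · have hr : specFirst ch t = -1 := by omega
      simp [Ne.symm h1, ih.mp hr]

lemma specFirst_le (ch : Char) (l : List Char) (i : Nat) (h : l[i]? = some ch) :
    specFirst ch l ≤ (i : Int) := by
  induction l generalizing i with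
  | nil => simp at h
  | cons a t ih =>
    have hlb := specFirst_lb ch t
    simp only [specFirst]
    cases i with
    | zero => simp only [List.getElem?_cons_zero, Option.some_inj] at h; simp [h]
    | succ j =>
      simp only [List.getElem?_cons_succ] at h
      have := ih j h
      split_ifs <;> push_cast <;> omega

lemma specFirst_append (ch : Char) (xs : List Char) (a : Char) :
    specFirst ch (xs ++ [a]) =
      if 0 ≤ specFirst ch xs then specFirst ch xs
      else if a = ch then (xs.length : Int) else -1 := by
  induction xs with
  | nil => simp [specFirst]
  | cons x xs ih =>
    have hlb := specFirst_lb ch xs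
    simp only [List.cons_append, specFirst, ih, List.length_cons]
    split_ifs <;> push_cast <;> omega

lemma specFirst_take (ch : Char) (l : List Char) (n : Nat) :
    specFirst ch (l.take n) =
      if 0 ≤ specFirst ch l ∧ specFirst ch l < n then specFirst ch l else -1 := by
  induction l generalizing n with
  | nil => simp [specFirst]
  | cons a t ih =>
    have hlb := specFirst_lb ch t
    cases n with
    | zero =>
      simp only [List.take_zero, specFirst]
      split_ifs <;> first | rfl | omega
    | succ m =>
      simp only [List.take_succ_cons, specFirst, ih m]
      split_ifs <;> push_cast <;> omega

lemma pvScan_eq (l : List Char) : pvScan l = (specLast '(' l, specLast ')' l) := by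
  induction l using List.reverseRecOn with
  | nil => simp [pvScan, PySem.List.pyRange_one_eq_nil, specLast]
  | append_singleton m a ih =>
    have hcast : (((m ++ [a]).length : Nat) : Int) = (m.length : Int) + 1 := by
      simp
    unfold pvScan
    rw [hcast, PySem.List.pyRange_one_succ_right (by positivity), List.foldl_append]
    have hcongr :
        (PySem.List.pyRange 0 m.length).foldl
          (fun oc i =>
            if PySem.List.pyGetD (m ++ [a]) i ' ' = '(' then (i, oc.2)
            else if PySem.List.pyGetD (m ++ [a]) i ' ' = ')' then (oc.1, i)
            else oc) (-1, -1) = pvScan m := by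
      apply PySem.List.foldl_congr_mem
      intro acc x hx
      rw [PySem.List.mem_pyRange_one] at hx
      have hlt : x < ((m ++ [a]).length : Int) := by
        simp only [List.length_append, List.length_cons, List.length_nil]; push_cast; omega
      rw [PySem.List.pyGetD_eq_getElem _ ' ' hx.1 hlt,
          PySem.List.pyGetD_eq_getElem _ ' ' hx.1 (by omega),
          List.getElem_append_left (by omega)]
    rw [hcongr, ih]
    have hgetlast : PySem.List.pyGetD (m ++ [a]) (m.length : Int) ' ' = a := by
      rw [PySem.List.pyGetD_eq_getElem _ ' ' (by positivity)
            (by simp only [List.length_append, List.length_cons, List.length_nil]; push_cast; omega)]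
      simp only [Int.toNat_natCast]
      exact List.getElem_concat_length rfl (by simp)
    simp only [List.foldl_cons, List.foldl_nil, hgetlast, specLast_append]
    by_cases ha1 : a = '('
    · simp [ha1]
    · by_cases ha2 : a = ')'
      · simp [ha2]
      · simp [ha1, ha2]

lemma altScanRev_spec (m : List Char) (cut0 : Option Int) :
    altScanRev m.reverse ((m.length : Int) - 1) cut0 =
      (if 0 ≤ specFirstFrom '(' m (specLast ')' m + 1).toNat
       then some (specFirstFrom '(' m (specLast ')' m + 1).toNat) else cut0) := by
  induction m using List.reverseRecOn generalizing cut0 with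
  | nil => simp [altScanRev, specFirstFrom, specFirst, specLast]
  | append_singleton m a ih =>
    have hlb := specLast_lb ')' m
    have hlt := specLast_lt ')' m
    have hrev : (m ++ [a]).reverse = a :: m.reverse := by simp
    have hidx : ((m ++ [a]).length : Int) - 1 = (m.length : Int) := by simp
    rw [hrev, hidx]
    simp only [altScanRev]
    by_cases ha2 : a = ')'
    · -- breaks immediately: RHS's scan region past the end is empty
      rw [if_pos ha2]
      have hc : specLast ')' (m ++ [a]) = (m.length : Int) := by
        rw [specLast_append, if_pos ha2]
      have hdrop : (m ++ [a]).drop ((m.length : Int) + 1).toNat = [] := by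
        apply List.drop_eq_nil_of_le; simp
      rw [hc]
      simp [specFirstFrom, specFirst]
    · rw [if_neg ha2]
      rw [ih]
      have hc : specLast ')' (m ++ [a]) = specLast ')' m := by
        rw [specLast_append, if_neg ha2]
      have hk : (specLast ')' m + 1).toNat ≤ m.length := by omega
      have hdrop : (m ++ [a]).drop (specLast ')' m + 1).toNat
          = m.drop (specLast ')' m + 1).toNat ++ [a] :=
        List.drop_append_of_le_length hk
      have hlen : ((m.drop (specLast ')' m + 1).toNat).length : Int)
          + ((specLast ')' m + 1).toNat : Int) = (m.length : Int) := by
        rw [List.length_drop]; omega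
      rw [hc]
      by_cases ha1 : a = '('
      · -- the appended char is a '(' : it is found iff nothing earlier was
        have hffa : specFirstFrom '(' (m ++ [a]) (specLast ')' m + 1).toNat =
            if 0 ≤ specFirstFrom '(' m (specLast ')' m + 1).toNat
            then specFirstFrom '(' m (specLast ')' m + 1).toNat else (m.length : Int) := by
          simp only [specFirstFrom, hdrop, specFirst_append, if_pos ha1]
          have hfb := specFirst_lb '(' (m.drop (specLast ')' m + 1).toNat)
          split_ifs <;> omega
        rw [hffa, if_pos ha1]
        have hfb := specFirst_lb '(' (m.drop (specLast ')' m + 1).toNat)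
        simp only [specFirstFrom] at *
        split_ifs <;> first | rfl | omega
      · have hffa : specFirstFrom '(' (m ++ [a]) (specLast ')' m + 1).toNat =
            specFirstFrom '(' m (specLast ')' m + 1).toNat := by
          simp only [specFirstFrom, hdrop, specFirst_append, if_neg ha1]
          have hfb := specFirst_lb '(' (m.drop (specLast ')' m + 1).toNat)
          split_ifs <;> omega
        rw [hffa, if_neg ha1]

def Aclosed (l : List Char) : List Char :=
  if specLast ')' l = 0 then l
  else if 0 ≤ specFirstFrom '(' l (specLast ')' l + 1).toNat
       then l.take (specFirstFrom '(' l (specLast ')' l + 1).toNat).toNat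
       else l

-- the trim step preserves the closed form: Aclosed (take o l) = Aclosed l
lemma Aclosed_take (l : List Char)
    (hc0 : specLast ')' l ≠ 0) (hco : specLast ')' l < specLast '(' l)
    (ho : 0 ≤ specLast '(' l) :
    Aclosed (l.take (specLast '(' l).toNat) = Aclosed l := by
  set o := specLast '(' l with hodef
  set c := specLast ')' l with hcdef
  have hclb := specLast_lb ')' l
  have holt := specLast_lt '(' l
  have hcm : specLast ')' (l.take o.toNat) = c := by
    rw [hcdef]
    exact specLast_take ')' l o.toNat (by rw [← hcdef]; omega)
  set k := (c + 1).toNat with hkdef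
  have hk : k ≤ o.toNat := by omega
  have hocc : (l.drop k)[o.toNat - k]? = some '(' := by
    rw [List.getElem?_drop, Nat.add_sub_cancel' hk]
    rw [hodef]
    exact specLast_get '(' l (by rw [← hodef]; omega)
  have hr0 : 0 ≤ specFirst '(' (l.drop k) := by
    rcases Int.lt_or_le (specFirst '(' (l.drop k)) 0 with h | h
    · have := (specFirst_neg '(' (l.drop k)).mp
        (by have := specFirst_lb '(' (l.drop k); omega)
      exact absurd (List.mem_of_getElem? hocc) this
    · exact h
  set r := specFirst '(' (l.drop k) with hrdef
  have hrle : r ≤ (o.toNat : Int) - k := by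
    have := specFirst_le '(' (l.drop k) (o.toNat - k) hocc
    rw [← hrdef] at this
    omega
  have hdt : (l.take o.toNat).drop k = (l.drop k).take (o.toNat - k) := List.drop_take
  have hrt : specFirst '(' ((l.take o.toNat).drop k) =
      if 0 ≤ r ∧ r < ((o.toNat - k : Nat) : Int) then r else -1 := by
    rw [hdt, specFirst_take, ← hrdef]
  unfold Aclosed
  rw [hcm, if_neg hc0, ← hcdef, if_neg hc0, ← hkdef]
  simp only [specFirstFrom, hrt, ← hrdef]
  by_cases hlt2 : r < ((o.toNat - k : Nat) : Int)
  · have hcond : 0 ≤ r ∧ r < ((o.toNat - k : Nat) : Int) := ⟨hr0, hlt2⟩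
    simp only [if_pos hcond, if_pos hr0,
      if_pos (show (0:Int) ≤ r + (k : Int) by omega)]
    rw [List.take_take]
    congr 1
    push_cast at hlt2
    omega
  · have hreq : r = (o.toNat : Int) - k := by push_cast at hlt2 ⊢; omega
    have hcond : ¬(0 ≤ r ∧ r < ((o.toNat - k : Nat) : Int)) := by
      intro hcc; exact hlt2 hcc.2
    simp only [if_neg hcond]
    norm_num
    rw [if_pos hr0, if_pos (show (0:Int) ≤ r + (k : Int) by omega)]
    congr 1
    omega

lemma mem_getElem?_exists {α : Type} {a : α} {l : List α} (h : a ∈ l) :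
    ∃ i : Nat, l[i]? = some a := by
  obtain ⟨i, hi, hg⟩ := List.mem_iff_getElem.mp h
  exact ⟨i, by rw [List.getElem?_eq_getElem hi, hg]⟩

lemma core_eq : ∀ (n : Nat) (l : List Char), l.length < n →
    clear_brackets_core n l = Aclosed l := by
  intro n
  induction n with
  | zero => intro l h; omega
  | succ n ih =>
    intro l h
    have hclb := specLast_lb ')' l
    have holb := specLast_lb '(' l
    have holt := specLast_lt '(' l
    simp only [clear_brackets_core, pvScan_eq]
    by_cases hb1 : ¬(specLast '(' l, specLast ')' l).1 = 0 ∧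
        ¬(specLast '(' l, specLast ')' l).2 = 0 ∧
        (specLast '(' l, specLast ')' l).2 < (specLast '(' l, specLast ')' l).1
    · rw [if_pos hb1]
      obtain ⟨ho1, hc1, hco⟩ := hb1
      simp only at ho1 hc1 hco
      have ho : 0 ≤ specLast '(' l := by omega
      rw [PySem.List.slice_to l ho]
      have hlen : (l.take (specLast '(' l).toNat).length < n := by
        rw [List.length_take]; omega
      rw [ih _ hlen]
      exact Aclosed_take l hc1 hco ho
    · rw [if_neg hb1]
      simp only [not_and, not_lt] at hb1
      by_cases hb2 : (specLast '(' l, specLast ')' l).2 < 0 ∧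
          0 ≤ (specLast '(' l, specLast ')' l).1
      · rw [if_pos hb2]
        obtain ⟨hcneg, ho⟩ := hb2
        simp only at hcneg ho
        have ho0 : specLast '(' l = 0 := by
          by_contra hne
          have := hb1 hne (by omega)
          omega
        rw [PySem.List.slice_to l ho, ho0]
        simp only [Int.toNat_zero, List.take_zero]
        have hget0 : l[(0:Nat)]? = some '(' := by
          have hg := specLast_get '(' l (by omega)
          rw [ho0] at hg
          simpa using hg
        have hlpos : 0 < l.length := by
          cases l with
          | nil => simp at hget0
          | cons x t => simp
        rw [ih [] (by simp; omega)]
        have hA : Aclosed l = [] := by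
          have hr0 : specFirst '(' l ≤ 0 := by
            have := specFirst_le '(' l 0 hget0; simpa using this
          have hrmem : 0 ≤ specFirst '(' l := by
            rcases Int.lt_or_le (specFirst '(' l) 0 with hlt | hle
            · exact absurd (List.mem_of_getElem? hget0)
                ((specFirst_neg '(' l).mp (by have := specFirst_lb '(' l; omega))
            · exact hle
          have hr : specFirst '(' l = 0 := le_antisymm hr0 hrmem
          have hkz : (specLast ')' l + 1).toNat = 0 := by omega
          unfold Aclosed
          rw [if_neg (by omega : ¬ specLast ')' l = 0)]
          simp only [specFirstFrom, hkz, List.drop_zero, hr]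
          norm_num
        rw [hA]
        simp [Aclosed, specLast, specFirstFrom, specFirst]
      · rw [if_neg hb2]
        simp only [not_and] at hb2
        by_cases hc0 : specLast ')' l = 0
        · unfold Aclosed
          rw [if_pos hc0]
        · have hq : specFirst '(' (l.drop (specLast ')' l + 1).toNat) = -1 := by
            rw [specFirst_neg]
            intro hmem
            obtain ⟨j, hj⟩ := mem_getElem?_exists hmem
            rw [List.getElem?_drop] at hj
            have hoj := specLast_ge '(' l _ hj
            have ho : 0 ≤ specLast '(' l := le_trans (Int.natCast_nonneg _) hoj
            have hcge : 0 ≤ specLast ')' l := by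
              by_contra hcc
              have := hb2 (by omega)
              omega
            have hole : specLast '(' l ≤ specLast ')' l := hb1 (by omega) hc0
            omega
          unfold Aclosed
          rw [if_neg hc0]
          simp only [specFirstFrom, hq]
          norm_num

lemma A_closed (s : String) : clear_brackets s = String.ofList (Aclosed s.toList) := by
  unfold clear_brackets
  rw [core_eq _ _ (Nat.lt_succ_self _)]

lemma alt_closed (s : String) : clear_brackets_alt s =
    (if 0 ≤ specFirstFrom '(' s.toList (specLast ')' s.toList + 1).toNat
     then String.ofList (s.toList.take (specFirstFrom '(' s.toList (specLast ')' s.toList + 1).toNat).toNat)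
     else s) := by
  unfold clear_brackets_alt
  rw [altScanRev_spec]
  split_ifs with h
  · show String.ofList (PySem.List.slice s.toList none _) = _
    rw [PySem.List.slice_to _ h]
  · rfl

-- c = 0 means: the list starts with ')' and has no other ')'
lemma specLast_zero_iff (l : List Char) :
    specLast ')' l = 0 ↔ l.head? = some ')' ∧ ')' ∉ l.tail := by
  cases l with
  | nil => simp [specLast]
  | cons a t =>
    have hlb := specLast_lb ')' t
    simp only [specLast, List.head?_cons, List.tail_cons, Option.some_inj]
    constructor
    · intro h
      split_ifs at h with h1 h2
      · omega
      · exact ⟨h2, (specLast_neg ')' t).mp (by omega)⟩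
    · rintro ⟨ha, hnt⟩
      rw [if_neg (by have := (specLast_neg ')' t).mpr hnt; omega), if_pos ha]

theorem unchanged (s : String) (hnD : ¬ D_clear_brackets s) :
    clear_brackets s = clear_brackets_alt s := by
  rw [A_closed, alt_closed]
  by_cases hc0 : specLast ')' s.toList = 0
  · -- A returns s unchanged; so does B, because ¬D_ says there is no '(' in the tail
    obtain ⟨ha, hnt⟩ := (specLast_zero_iff s.toList).mp hc0
    have hnp : '(' ∉ s.toList.tail := by
      intro hp
      exact hnD ⟨ha, hnt, hp⟩
    have hdrop : s.toList.drop (specLast ')' s.toList + 1).toNat = s.toList.tail := by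
      rw [hc0]
      norm_num
    have hq : specFirstFrom '(' s.toList (specLast ')' s.toList + 1).toNat = -1 := by
      simp only [specFirstFrom, hdrop, (specFirst_neg '(' s.toList.tail).mpr hnp]
      norm_num
    rw [hq]
    norm_num
    unfold Aclosed
    rw [if_pos hc0, String.ofList_toList]
  · unfold Aclosed
    rw [if_neg hc0]
    split_ifs with h
    · rfl
    · rw [String.ofList_toList]

theorem tight (s : String) (hD : D_clear_brackets s) :
    clear_brackets s ≠ clear_brackets_alt s := by
  obtain ⟨ha, hnt, hp⟩ := hD
  have hc0 : specLast ')' s.toList = 0 := (specLast_zero_iff _).mpr ⟨ha, hnt⟩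
  have hdrop : s.toList.drop (specLast ')' s.toList + 1).toNat = s.toList.tail := by
    rw [hc0]; norm_num
  have hr0 : 0 ≤ specFirst '(' s.toList.tail := by
    rcases Int.lt_or_le (specFirst '(' s.toList.tail) 0 with hlt | hle
    · exact absurd hp ((specFirst_neg '(' s.toList.tail).mp
        (by have := specFirst_lb '(' s.toList.tail; omega))
    · exact hle
  have hrlt := specFirst_lt '(' s.toList.tail
  have hq : specFirstFrom '(' s.toList (specLast ')' s.toList + 1).toNat
      = specFirst '(' s.toList.tail + 1 := by
    simp only [specFirstFrom, hdrop]
    rw [if_pos hr0, hc0]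
    norm_num
  have hlen0 : 0 < s.toList.length := by
    cases hl : s.toList with
    | nil => rw [hl] at ha; simp at ha
    | cons x t => simp
  have htl : s.toList.tail.length = s.toList.length - 1 := List.length_tail ..
  rw [A_closed, alt_closed]
  unfold Aclosed
  rw [if_pos hc0, hq, if_pos (by omega)]
  intro heq
  have hteq := congrArg String.toList heq
  rw [String.toList_ofList, String.toList_ofList] at hteq
  have hlen := congrArg List.length hteq
  rw [List.length_take] at hlen
  omega

-- ===== VERDICT (by name: the statements are the Claim_ definitions above) =====
theorem clear_brackets_spec : Claim_unchanged_clear_brackets := by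
  intro s _hdom
  unfold Spec_clear_brackets
  intro hnD
  exact unchanged s hnD

theorem clear_brackets_changed : Claim_changed_clear_brackets := by
  unfold Claim_changed_clear_brackets; decide

theorem clear_brackets_tight : Claim_exact_clear_brackets := by
  intro s _hdom hD
  exact tight s hD
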